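-- pv_equiv track=rewrite | github.com/wek234/pychatbot-thirard-lavie-c | fct_analyze.py | mots_communs
-- ===== SOURCE A (Python) =====
-- def mots_communs(tfidf_matrice, tout_mots, list_f):
--     mots_comm = []
--
--     # boucle sur chaque mot
--     for i, mot in enumerate(tout_mots):
--         # initialise une variable pour indiquer si le mot est commun à tous les présidents
--         est_commun = True
--         # boucle sur chaque fichier pour vérifier si le score TF-IDF est non nul
--         j = 0
--         while est_commun and j < len(list_f):
--             if tfidf_matrice[i][j] == 0:
--                 # si le score TF-IDF est nul dans un fichier le mot n'est pas commun
--                 est_commun = False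
--             j += 1
--         # si le mot est commun à tous les présidents l'ajoute à la liste
--         if est_commun:
--             mots_comm.append(mot)
--     return mots_comm
-- ===== SOURCE B (Python) =====
-- def mots_communs(tfidf_matrice, tout_mots, list_f):
--     # file-major: keep a shrinking list of candidate word indices
--     candidates = list(range(len(tout_mots)))
--     for j in range(len(list_f)):
--         candidates = [i for i in candidates if tfidf_matrice[i][j] != 0]
--     return [tout_mots[i] for i in candidates]
-- ===== Notes on version B (the rewrite author's own statement) =====
-- stated objective: alternative
-- what changed: Inverted the loop nesting: instead of a per-word inner while-loop with a boolean flag, B loops file-major over columns, maintaining a shrinking list of candidate word indices and filtering out any candidate whose TF-IDF entry is zero, then maps surviving indices to words.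
import Mathlib
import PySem

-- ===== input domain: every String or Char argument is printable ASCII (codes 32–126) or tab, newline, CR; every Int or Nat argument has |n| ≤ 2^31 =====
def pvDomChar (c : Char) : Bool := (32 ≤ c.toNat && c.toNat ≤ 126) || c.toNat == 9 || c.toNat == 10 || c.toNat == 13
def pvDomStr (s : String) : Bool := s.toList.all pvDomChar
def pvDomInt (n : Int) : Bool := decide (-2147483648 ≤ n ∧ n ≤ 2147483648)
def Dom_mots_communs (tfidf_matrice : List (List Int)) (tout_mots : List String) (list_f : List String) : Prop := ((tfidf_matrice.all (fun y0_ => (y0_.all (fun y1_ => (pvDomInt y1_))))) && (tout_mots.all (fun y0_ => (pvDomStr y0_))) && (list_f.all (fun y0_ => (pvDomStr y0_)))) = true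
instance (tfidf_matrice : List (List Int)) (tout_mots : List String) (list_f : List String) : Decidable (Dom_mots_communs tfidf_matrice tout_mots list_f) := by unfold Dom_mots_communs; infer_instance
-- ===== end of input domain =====

-- B inverts A's nesting (files outer, shrinking candidate-index list) instead of a per-word
-- boolean inner while-loop; objective: alternative decomposition, same exact result.

-- shared indexing primitive: tfidf_matrice[i][j] (none = IndexError; excluded by Pre_)
def pvEntry (m : List (List Int)) (i j : Nat) : Option Int := (m[i]?).bind (fun r => r[j]?)

-- ===== PORT A =====
-- the inner 'while est_commun and j < len(list_f)' loop of A
def mcWhileA (m : List (List Int)) (i : Nat) (nf : Nat) (j : Nat) (est : Bool) : Bool :=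
  if _h : est = true ∧ j < nf then
    match pvEntry m i j with
    | none => false  -- Python raises IndexError here; such inputs lie outside Pre_
    | some v => mcWhileA m i nf (j + 1) (if v = 0 then false else est)
  else est
termination_by nf - j
decreasing_by omega

def mots_communs (tfidf_matrice : List (List Int)) (tout_mots : List String) (list_f : List String) : List String :=
  (PySem.List.enumerate tout_mots 0).foldl
    (fun acc im => if mcWhileA tfidf_matrice im.1.toNat list_f.length 0 true then acc ++ [im.2] else acc) []

-- ===== PORT B =====
def mots_communs_alt (tfidf_matrice : List (List Int)) (tout_mots : List String) (list_f : List String) : List String :=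
  let cands := (List.range list_f.length).foldl
    (fun cs j => cs.filter (fun i => pvEntry tfidf_matrice i j != some 0))
    (List.range tout_mots.length)
  cands.filterMap (fun i => tout_mots[i]?)

-- ===== PRECONDITION & SPEC =====
-- Pre_ excludes exactly the inputs where A raises IndexError: whenever the inner scan of word i
-- reaches column j (all earlier columns of row i present and nonzero), entry (i,j) must exist.
def Pre_mots_communs (tfidf_matrice : List (List Int)) (tout_mots : List String) (list_f : List String) : Prop :=
  ∀ i < tout_mots.length, ∀ j < list_f.length,
    (∀ k < j, (pvEntry tfidf_matrice i k).isSome ∧ pvEntry tfidf_matrice i k ≠ some 0) →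
    (pvEntry tfidf_matrice i j).isSome
instance (tfidf_matrice : List (List Int)) (tout_mots : List String) (list_f : List String) : Decidable (Pre_mots_communs tfidf_matrice tout_mots list_f) := by unfold Pre_mots_communs; infer_instance

def pvWitness_mots_communs : List (List Int) × List String × List String :=
  ([[1, 0], [2, 3], [0]], ["a", "b", "c"], ["f1", "f2"])

def Spec_mots_communs (tfidf_matrice : List (List Int)) (tout_mots : List String) (list_f : List String) (out : List String) : Prop := out = mots_communs_alt tfidf_matrice tout_mots list_f
instance (tfidf_matrice : List (List Int)) (tout_mots : List String) (list_f : List String) (out : List String) : Decidable (Spec_mots_communs tfidf_matrice tout_mots list_f out) := by unfold Spec_mots_communs; infer_instance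

-- ===== CLAIM (what is proved, stated in full; the proofs are below) =====
def Claim_equal_mots_communs : Prop := ∀ (tfidf_matrice : List (List Int)) (tout_mots : List String) (list_f : List String), Dom_mots_communs tfidf_matrice tout_mots list_f → Pre_mots_communs tfidf_matrice tout_mots list_f → Spec_mots_communs tfidf_matrice tout_mots list_f (mots_communs tfidf_matrice tout_mots list_f)

-- ===== LEMMAS AND PROOFS =====

-- common recursive shape: keep xs[k] iff F k, recursing with the predicate shifted
def mcKeep (F : Nat → Bool) : List String → List String
  | [] => []
  | x :: t => if F 0 then x :: mcKeep (fun k => F (k + 1)) t else mcKeep (fun k => F (k + 1)) t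

theorem mcKeep_congr (F G : Nat → Bool) (xs : List String)
    (h : ∀ k < xs.length, F k = G k) : mcKeep F xs = mcKeep G xs := by
  induction xs generalizing F G with
  | nil => rfl
  | cons x t ih =>
      simp only [mcKeep, h 0 (by simp)]
      rw [ih (fun k => F (k + 1)) (fun k => G (k + 1)) (fun k hk => h (k + 1) (by simpa using hk))]

theorem mcWhileA_false (m : List (List Int)) (i nf j : Nat) :
    mcWhileA m i nf j false = false := by
  rw [mcWhileA]; simp

-- A's inner while-loop returns true iff every remaining column entry exists and is nonzero
theorem mcWhileA_true_iff (m : List (List Int)) (i nf : Nat) :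
    ∀ j, (mcWhileA m i nf j true = true ↔
      ∀ k, j ≤ k → k < nf → (pvEntry m i k).isSome ∧ pvEntry m i k ≠ some 0) := by
  intro j
  induction hfuel : nf - j generalizing j with
  | zero =>
      rw [mcWhileA]
      have hj : ¬ j < nf := by omega
      rw [dif_neg (by simp [hj])]
      constructor
      · intro _ k hk hk'; omega
      · intro _; rfl
  | succ n ih =>
      have hj : j < nf := by omega
      rw [mcWhileA, dif_pos (⟨rfl, hj⟩ : true = true ∧ j < nf)]
      cases he : pvEntry m i j with
      | none =>
          dsimp only
          constructor
          · intro h; simp at h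
          · intro h; exact absurd ((h j le_rfl hj).1) (by simp [he])
      | some v =>
          dsimp only
          by_cases hv : v = 0
          · subst hv
            rw [if_pos rfl, mcWhileA_false]
            constructor
            · intro h; simp at h
            · intro h; exact absurd he ((h j le_rfl hj).2)
          · rw [if_neg hv, ih (j + 1) (by omega)]
            constructor
            · intro h k hk hk'
              rcases Nat.eq_or_lt_of_le hk with rfl | hlt
              · exact ⟨by simp [he], by simp [he, hv]⟩
              · exact h k hlt hk'
            · intro h k hk hk'; exact h k (by omega) hk'

-- B's fold of per-file filters is one filter by the conjunction over all files
theorem mcFoldFilter (m : List (List Int)) (cs : List Nat) :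
    ∀ nf, (List.range nf).foldl (fun cs j => cs.filter (fun i => pvEntry m i j != some 0)) cs
      = cs.filter (fun i => decide (∀ j < nf, pvEntry m i j ≠ some 0)) := by
  intro nf
  induction nf with
  | zero => simp
  | succ n ih =>
      rw [List.range_succ, List.foldl_append, ih]
      simp only [List.foldl_cons, List.foldl_nil, List.filter_filter]
      apply List.filter_congr
      intro i _
      rw [Bool.eq_iff_iff]
      simp only [Bool.and_eq_true, bne_iff_ne, ne_eq, decide_eq_true_eq]
      constructor
      · rintro ⟨hn, hall⟩ j hj
        rcases Nat.lt_succ_iff_lt_or_eq.mp hj with h | rfl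
        · exact hall j h
        · exact hn
      · intro h
        exact ⟨h n (by omega), fun j hj => h j (by omega)⟩

-- A's enumerate-fold equals mcKeep of its per-index predicate
theorem mcFoldA (F : Int → Bool) :
    ∀ (xs : List String) (s : Int), 0 ≤ s → ∀ (acc : List String),
      (PySem.List.enumerate xs s).foldl (fun acc im => if F im.1 then acc ++ [im.2] else acc) acc
        = acc ++ mcKeep (fun k => F (s + k)) xs := by
  intro xs
  induction xs with
  | nil => intro s _ acc; simp [PySem.List.enumerate_nil, mcKeep]
  | cons x t ih =>
      intro s hs acc
      rw [PySem.List.enumerate_cons, List.foldl_cons]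
      rw [ih (s + 1) (by omega) (if F s then acc ++ [x] else acc)]
      have hpred : (fun k : Nat => F (s + 1 + (k : Int)))
          = (fun k : Nat => F (s + ((k : Int) + 1))) := by
        funext k; congr 1; ring
      rw [hpred]
      by_cases hF : F s
      · simp [mcKeep, hF, List.append_assoc]
      · simp [mcKeep, hF]

-- B's filter-range-then-index equals mcKeep of the same predicate
theorem mcFilterRange :
    ∀ (xs : List String) (Q : Nat → Bool),
      ((List.range xs.length).filter Q).filterMap (fun i => xs[i]?) = mcKeep Q xs := by
  intro xs
  induction xs with
  | nil => intro Q; simp [mcKeep]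
  | cons x t ih =>
      intro Q
      rw [List.length_cons, List.range_succ_eq_map, List.filter_cons]
      have hmap : (List.filter Q (List.map Nat.succ (List.range t.length))).filterMap
            (fun i => (x :: t)[i]?)
          = ((List.range t.length).filter (fun k => Q (k + 1))).filterMap (fun i => t[i]?) := by
        rw [List.filter_map, List.filterMap_map]
        simp [Function.comp_def]
      by_cases hQ : Q 0
      · rw [if_pos hQ, List.filterMap_cons]
        simp only [List.getElem?_cons_zero, hmap, ih (fun k => Q (k + 1))]
        simp [mcKeep, hQ]
      · rw [if_neg hQ, hmap, ih (fun k => Q (k + 1))]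
        simp [mcKeep, hQ]

-- under Pre_, for a word index i the two per-index predicates agree
theorem mcPointwise (m : List (List Int)) (nf : Nat) (i : Nat)
    (hpre : ∀ j < nf, (∀ k < j, (pvEntry m i k).isSome ∧ pvEntry m i k ≠ some 0) → (pvEntry m i j).isSome) :
    mcWhileA m i nf 0 true = decide (∀ j < nf, pvEntry m i j ≠ some 0) := by
  rcases Bool.eq_false_or_eq_true (decide (∀ j < nf, pvEntry m i j ≠ some 0)) with hd | hd
  · have hd' : ∀ j < nf, pvEntry m i j ≠ some 0 := of_decide_eq_true hd
    rw [hd, mcWhileA_true_iff]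
    intro k _ hk
    induction k using Nat.strong_induction_on with
    | _ k ihk =>
        have hsome : (pvEntry m i k).isSome :=
          hpre k hk (fun l hl => ihk l hl (by omega) (by omega))
        exact ⟨hsome, hd' k hk⟩
  · have hnot : ¬ ∀ j < nf, pvEntry m i j ≠ some 0 := of_decide_eq_false hd
    push Not at hnot
    rcases hnot with ⟨j, hj, hj0⟩
    rw [hd, Bool.eq_false_iff]
    intro htrue
    exact ((mcWhileA_true_iff m i nf 0).mp htrue j (by omega) hj).2 hj0

-- ===== VERDICT (by name: the statement is the Claim_ definition above) =====
theorem mots_communs_spec : Claim_equal_mots_communs := by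
  intro m mots fs _ hpre
  unfold Spec_mots_communs mots_communs mots_communs_alt
  rw [mcFoldA (fun i => mcWhileA m i.toNat fs.length 0 true) mots 0 le_rfl []]
  rw [mcFoldFilter m (List.range mots.length) fs.length]
  rw [mcFilterRange mots (fun i => decide (∀ j < fs.length, pvEntry m i j ≠ some 0))]
  simp only [List.nil_append]
  apply mcKeep_congr
  intro k hk
  have h0 : ((0 : Int) + (k : Int)).toNat = k := by omega
  show mcWhileA m ((0 + (k : Int)).toNat) fs.length 0 true = _
  rw [h0]
  exact mcPointwise m fs.length k (hpre k hk)
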